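-- pv_equiv track=rewrite | github.com/payelsantra/MaskToCorrect | maskers/diversity.py | map_phrases_by_edge_tokens
-- ===== SOURCE A (Python) =====
-- def map_phrases_by_edge_tokens(sentence, phrases):
--     sentence_tokens = sentence.split()
--     sentence_lower = [t.lower().strip(",.") for t in sentence_tokens]
--     results = []
--
--     for phrase in phrases:
--         phrase_tokens = phrase.lower().split()
--         if not phrase_tokens:
--             results.append(None)
--             continue
--
--         first_token = phrase_tokens[0]
--         last_token = phrase_tokens[-1]
--         matched = None
--
--         # Look for spans where first and last token match
--         for i in range(len(sentence_tokens)):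
--             if sentence_lower[i] != first_token:
--                 continue
--             for j in range(i, len(sentence_tokens)):
--                 if sentence_lower[j] == last_token:
--                     span = " ".join(sentence_tokens[i:j+1])
--                     matched = span
--                     break
--             if matched:
--                 break
--
--         results.append(matched)
--     return results
-- ===== SOURCE B (Python) =====
-- def map_phrases_by_edge_tokens(sentence, phrases):
--     tokens = sentence.split()
--     lower = [t.lower().strip(",.") for t in tokens]
--     positions = {}
--     for tok, idx in zip(lower, range(len(lower))):
--         positions.setdefault(tok, []).append(idx)
--
--     def lookup(phrase):
--         phrase_tokens = phrase.lower().split()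
--         if not phrase_tokens:
--             return None
--         first_pos = positions.get(phrase_tokens[0], [])
--         last_pos = positions.get(phrase_tokens[-1], [])
--         if first_pos and last_pos:
--             i = first_pos[0]
--             for j in last_pos:
--                 if j >= i:
--                     return " ".join(tokens[i:j + 1])
--         return None
--
--     return [lookup(phrase) for phrase in phrases]
-- ===== Notes on version B (the rewrite author's own statement) =====
-- stated objective: faster
-- what changed: B builds a token-to-sorted-position index over the normalized sentence tokens once, then answers each phrase by taking the first position of its first token and scanning that token's (and the last token's) precomputed position lists, replacing A's nested O(n^2) span scan per phrase.
import Mathlib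
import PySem

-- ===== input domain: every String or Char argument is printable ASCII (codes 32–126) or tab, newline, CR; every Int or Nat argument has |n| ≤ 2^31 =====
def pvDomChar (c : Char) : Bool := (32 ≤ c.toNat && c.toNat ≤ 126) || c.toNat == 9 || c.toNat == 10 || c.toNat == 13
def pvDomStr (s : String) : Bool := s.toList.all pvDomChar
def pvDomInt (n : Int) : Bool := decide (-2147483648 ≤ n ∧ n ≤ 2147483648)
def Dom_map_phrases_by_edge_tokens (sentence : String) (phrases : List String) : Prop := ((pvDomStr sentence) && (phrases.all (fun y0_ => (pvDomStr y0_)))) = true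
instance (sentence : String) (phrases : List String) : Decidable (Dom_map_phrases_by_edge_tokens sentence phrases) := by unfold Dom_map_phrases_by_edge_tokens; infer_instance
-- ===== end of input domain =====

-- B replaces A's per-phrase nested scan of the sentence by a token→positions index
-- built once over the normalized tokens; proved to return the same list.

-- ===== PORT A =====
-- shared normalization: t.lower().strip(",.")
def pvNormTok (t : String) : String := PySem.Str.stripChars (PySem.Str.lower t) ",."

-- " ".join(sentence_tokens[i:j+1])
def pvSpan (toks : List String) (i j : Nat) : String :=
  PySem.Str.join " " (PySem.List.slice toks (some (i : Int)) (some ((j : Int) + 1)))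

-- Python truthiness of 'matched' (None or a str)
def pvTruthy (m : Option String) : Bool :=
  match m with
  | none => false
  | some s => !s.toList.isEmpty

-- inner 'for j in range(i, len(sentence_tokens))' with its break
def pvInnerA (toks low : List String) (lastTok : String) (i j : Nat) : Option String :=
  if _h : j < toks.length then
    if low.getD j "" == lastTok then some (pvSpan toks i j)
    else pvInnerA toks low lastTok i (j + 1)
  else none
termination_by toks.length - j

-- outer 'for i in range(len(sentence_tokens))' with its break; 'matched' carried along
def pvOuterA (toks low : List String) (firstTok lastTok : String)
    (matched : Option String) (i : Nat) : Option String :=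
  if _h : i < toks.length then
    if !(low.getD i "" == firstTok) then pvOuterA toks low firstTok lastTok matched (i + 1)
    else
      let m := match pvInnerA toks low lastTok i i with
               | some s => some s
               | none => matched
      if pvTruthy m then m else pvOuterA toks low firstTok lastTok m (i + 1)
  else matched
termination_by toks.length - i

def map_phrases_by_edge_tokens (sentence : String) (phrases : List String) : List (Option String) :=
  let sentence_tokens := PySem.Str.split₀ sentence
  let sentence_lower := sentence_tokens.map pvNormTok
  phrases.foldl (fun results phrase =>
    let phrase_tokens := PySem.Str.split₀ (PySem.Str.lower phrase)
    if phrase_tokens.isEmpty then results ++ [none]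
    else
      results ++ [pvOuterA sentence_tokens sentence_lower
        (PySem.List.pyGetD phrase_tokens 0 "") (PySem.List.pyGetD phrase_tokens (-1) "")
        none 0]) []

-- ===== PORT B =====
-- positions built once: for tok, idx in zip(lower, range(len(lower))): positions.setdefault(tok, []).append(idx)
def pvPositions (low : List String) : PySem.Dict String (List Int) :=
  (low.zip (PySem.List.pyRange 0 low.length 1)).foldl
    (fun d p => d.modify p.1 [] (· ++ [p.2])) PySem.Dict.empty

-- def lookup(phrase): ...   (the 'for j in last_pos: if j >= i: return span' loop is find?)
def pvLookup (toks : List String) (positions : PySem.Dict String (List Int))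
    (phrase : String) : Option String :=
  let phrase_tokens := PySem.Str.split₀ (PySem.Str.lower phrase)
  if phrase_tokens.isEmpty then none
  else
    let first_pos := positions.getD (PySem.List.pyGetD phrase_tokens 0 "") []
    let last_pos := positions.getD (PySem.List.pyGetD phrase_tokens (-1) "") []
    match first_pos, last_pos with
    | i :: _, j0 :: js =>
      ((j0 :: js).find? (fun j => decide (i ≤ j))).map
        (fun j => PySem.Str.join " " (PySem.List.slice toks (some i) (some (j + 1))))
    | _, _ => none

def map_phrases_by_edge_tokens_alt (sentence : String) (phrases : List String) : List (Option String) :=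
  let tokens := PySem.Str.split₀ sentence
  let lower := tokens.map pvNormTok
  let positions := pvPositions lower
  phrases.map (pvLookup tokens positions)

-- ===== PRECONDITION & SPEC =====
def Spec_map_phrases_by_edge_tokens (sentence : String) (phrases : List String) (out : List (Option String)) : Prop := out = map_phrases_by_edge_tokens_alt sentence phrases
instance (sentence : String) (phrases : List String) (out : List (Option String)) : Decidable (Spec_map_phrases_by_edge_tokens sentence phrases out) := by unfold Spec_map_phrases_by_edge_tokens; infer_instance

-- ===== CLAIM (what is proved, stated in full; the proofs are below) =====
def Claim_equal_map_phrases_by_edge_tokens : Prop := ∀ (sentence : String) (phrases : List String), Dom_map_phrases_by_edge_tokens sentence phrases → Spec_map_phrases_by_edge_tokens sentence phrases (map_phrases_by_edge_tokens sentence phrases)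

-- ===== LEMMAS AND PROOFS =====

-- first offset in l whose element == t
def pvFF (l : List String) (t : String) : Option Nat :=
  match l with
  | [] => none
  | x :: xs => if x == t then some 0 else (pvFF xs t).map (· + 1)

-- all offsets in l whose element == t, ascending
def pvNatPos (l : List String) (t : String) : List Nat :=
  match l with
  | [] => []
  | x :: xs => if x == t then 0 :: (pvNatPos xs t).map (· + 1) else (pvNatPos xs t).map (· + 1)

theorem pvNatPos_head? (l : List String) (t : String) : (pvNatPos l t).head? = pvFF l t := by
  induction l with
  | nil => rfl
  | cons x xs ih =>
    simp only [pvNatPos, pvFF]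
    split
    · rfl
    · rw [← ih]; cases pvNatPos xs t <;> rfl

theorem pvFF_lt_length (t : String) : ∀ (l : List String) (d : Nat),
    pvFF l t = some d → d < l.length := by
  intro l
  induction l with
  | nil => intro d h; simp [pvFF] at h
  | cons x xs ih =>
    intro d h
    simp only [pvFF] at h
    split at h
    · cases h; simp
    · rcases Option.map_eq_some_iff.mp h with ⟨d', hd', rfl⟩
      have := ih d' hd'
      simp; omega

theorem pvFF_cons_none (x : String) (xs : List String) (t : String)
    (h : pvFF (x :: xs) t = none) : pvFF xs t = none := by
  simp only [pvFF] at h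
  split at h
  · cases h
  · exact Option.map_eq_none_iff.mp h

theorem pvNatPos_find? (t : String) : ∀ (i : Nat) (l : List String),
    (pvNatPos l t).find? (fun k => decide (i ≤ k)) = (pvFF (l.drop i) t).map (· + i) := by
  intro i
  induction i with
  | zero =>
    intro l
    have hp : (fun k : Nat => decide (0 ≤ k)) = fun _ => true := by
      funext k; simp
    rw [hp]
    have htrue : ∀ (l' : List Nat), l'.find? (fun _ => true) = l'.head? := by
      intro l'; cases l' <;> simp
    rw [htrue, List.drop_zero, pvNatPos_head?]
    cases pvFF l t <;> simp
  | succ i ih =>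
    intro l
    cases l with
    | nil => simp [pvNatPos, pvFF]
    | cons x xs =>
      have hmap : (List.map (· + 1) (pvNatPos xs t)).find? (fun k => decide (i + 1 ≤ k))
          = (pvFF (xs.drop i) t).map (· + (i + 1)) := by
        rw [List.find?_map]
        have hp : ((fun k => decide (i + 1 ≤ k)) ∘ (· + 1) : Nat → Bool)
            = fun k => decide (i ≤ k) := by
          funext k; simp
        rw [hp, ih xs]
        cases pvFF (xs.drop i) t <;> simp [Nat.add_assoc]
      simp only [pvNatPos, List.drop_succ_cons]
      split
      · rw [List.find?_cons_of_neg (by simp), hmap]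
      · rw [hmap]

theorem pvInnerA_eq (toks low : List String) (lastTok : String)
    (hlen : low.length = toks.length) :
    ∀ j i, pvInnerA toks low lastTok i j
      = (pvFF (low.drop j) lastTok).map (fun d => pvSpan toks i (d + j)) := by
  have H : ∀ n j i, toks.length - j ≤ n → pvInnerA toks low lastTok i j
      = (pvFF (low.drop j) lastTok).map (fun d => pvSpan toks i (d + j)) := by
    intro n
    induction n with
    | zero =>
      intro j i hle
      have hj : ¬ j < toks.length := by omega
      rw [pvInnerA]
      simp only [dif_neg hj]
      have hd : low.drop j = [] := List.drop_eq_nil_of_le (by omega)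
      rw [hd]; rfl
    | succ n ih =>
      intro j i hle
      rw [pvInnerA]
      by_cases hj : j < toks.length
      · have hj' : j < low.length := by omega
        simp only [dif_pos hj]
        rw [List.drop_eq_getElem_cons hj']
        rw [List.getD_eq_getElem low "" hj']
        simp only [pvFF]
        by_cases he : low[j] == lastTok
        · simp [he]
        · simp only [he, Bool.false_eq_true, if_false]
          rw [ih (j + 1) i (by omega)]
          cases hres : pvFF (low.drop (j + 1)) lastTok with
          | none => simp
          | some d =>
            simp only [Option.map_some]
            have : d + (j + 1) = d + 1 + j := by omega
            rw [this]
      · have hd : low.drop j = [] := List.drop_eq_nil_of_le (by omega)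
        simp only [dif_neg hj]
        rw [hd]; rfl
  exact fun j i => H toks.length j i (by omega)

theorem pvSpan_ne_nil (toks : List String) (htk : ∀ s ∈ toks, s.toList ≠ []) (i j : Nat)
    (hij : i ≤ j) (hj : j < toks.length) : (pvSpan toks i j).toList ≠ [] := by
  unfold pvSpan
  have hcast : ((j : Int) + 1) = ((j + 1 : Nat) : Int) := by push_cast; ring
  rw [hcast, PySem.List.slice_natCast]
  have hi : i < toks.length := by omega
  rw [List.drop_eq_getElem_cons hi]
  have htake : j + 1 - i = (j - i) + 1 := by omega
  rw [htake, List.take_succ_cons]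
  rw [PySem.Str.toList_join]
  have hhd : toks[i].toList ≠ [] := htk _ (List.getElem_mem hi)
  simp only [List.map_cons]
  cases hrest : List.map String.toList (List.take (j - i) (List.drop (i + 1) toks)) with
  | nil => rw [PySem.Chars.join_singleton]; exact hhd
  | cons y ys =>
    rw [PySem.Chars.join_cons_cons]
    intro hcontra
    apply hhd
    exact (List.append_eq_nil_iff.mp (List.append_eq_nil_iff.mp hcontra).1).1

theorem pvOuterA_none (toks low : List String) (firstTok lastTok : String)
    (hlen : low.length = toks.length) :
    ∀ i, pvFF (low.drop i) lastTok = none →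
      pvOuterA toks low firstTok lastTok none i = none := by
  have H : ∀ n i, toks.length - i ≤ n → pvFF (low.drop i) lastTok = none →
      pvOuterA toks low firstTok lastTok none i = none := by
    intro n
    induction n with
    | zero =>
      intro i hle _
      rw [pvOuterA]
      simp only [dif_neg (by omega : ¬ i < toks.length)]
    | succ n ih =>
      intro i hle hnone
      rw [pvOuterA]
      by_cases hi : i < toks.length
      · have hi' : i < low.length := by omega
        have hstep : pvFF (low.drop (i + 1)) lastTok = none := by
          have h2 := hnone
          rw [List.drop_eq_getElem_cons hi'] at h2
          exact pvFF_cons_none _ _ _ h2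
        simp only [dif_pos hi]
        by_cases he : low.getD i "" == firstTok
        · simp only [he, Bool.not_true, Bool.false_eq_true, if_false]
          rw [pvInnerA_eq toks low lastTok hlen i i, hnone]
          simp only [Option.map_none]
          exact ih (i + 1) (by omega) hstep
        · simp only [he, Bool.not_false, if_true]
          exact ih (i + 1) (by omega) hstep
      · simp only [dif_neg hi]
  exact fun i => H toks.length i (by omega)

theorem pvOuterA_eq (toks low : List String) (firstTok lastTok : String)
    (hlen : low.length = toks.length) (htk : ∀ s ∈ toks, s.toList ≠ []) :
    ∀ i, pvOuterA toks low firstTok lastTok none i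
      = match pvFF (low.drop i) firstTok with
        | none => none
        | some d => (pvFF (low.drop (i + d)) lastTok).map
            (fun e => pvSpan toks (i + d) (e + (i + d))) := by
  have H : ∀ n i, toks.length - i ≤ n →
      pvOuterA toks low firstTok lastTok none i
        = match pvFF (low.drop i) firstTok with
          | none => none
          | some d => (pvFF (low.drop (i + d)) lastTok).map
              (fun e => pvSpan toks (i + d) (e + (i + d))) := by
    intro n
    induction n with
    | zero =>
      intro i hle
      have hd : low.drop i = [] := List.drop_eq_nil_of_le (by omega)
      rw [pvOuterA]
      simp only [dif_neg (by omega : ¬ i < toks.length)]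
      rw [hd]; rfl
    | succ n ih =>
      intro i hle
      rw [pvOuterA]
      by_cases hi : i < toks.length
      · have hi' : i < low.length := by omega
        simp only [dif_pos hi]
        rw [List.getD_eq_getElem low "" hi']
        by_cases he : low[i] == firstTok
        · simp only [he, Bool.not_true, Bool.false_eq_true, if_false]
          have hff : pvFF (low.drop i) firstTok = some 0 := by
            rw [List.drop_eq_getElem_cons hi']
            simp [pvFF, he]
          rw [hff, pvInnerA_eq toks low lastTok hlen i i]
          simp only [Nat.add_zero]
          cases hlast : pvFF (low.drop i) lastTok with
          | some e =>
            have hei : e + i < toks.length := by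
              have h1 := pvFF_lt_length lastTok _ _ hlast
              rw [List.length_drop] at h1; omega
            have hne := pvSpan_ne_nil toks htk i (e + i) (by omega) hei
            have htr : pvTruthy (some (pvSpan toks i (e + i))) = true := by
              simp [pvTruthy, hne]
            simp only [Option.map_some, htr, if_true]
          | none =>
            simp only [Option.map_none]
            have hfalse : pvTruthy none = false := rfl
            simp only [hfalse, Bool.false_eq_true, if_false]
            have hstep : pvFF (low.drop (i + 1)) lastTok = none := by
              have h2 := hlast
              rw [List.drop_eq_getElem_cons hi'] at h2
              exact pvFF_cons_none _ _ _ h2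
            rw [pvOuterA_none toks low firstTok lastTok hlen (i + 1) hstep]
        · simp only [he, Bool.not_false, if_true]
          rw [ih (i + 1) (by omega)]
          have hcons : pvFF (low.drop i) firstTok
              = (pvFF (low.drop (i + 1)) firstTok).map (· + 1) := by
            rw [List.drop_eq_getElem_cons hi']
            simp [pvFF, he]
          rw [hcons]
          cases hres : pvFF (low.drop (i + 1)) firstTok with
          | none => rfl
          | some d =>
            simp only [Option.map_some]
            have h1 : i + (d + 1) = (i + 1) + d := by omega
            rw [h1]
      · have hd : low.drop i = [] := List.drop_eq_nil_of_le (by omega)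
        simp only [dif_neg hi]
        rw [hd]; rfl
  exact fun i => H toks.length i (by omega)

theorem pvZipFilter (t : String) : ∀ (l : List String) (s : Int),
    ((l.zip (PySem.List.pyRange s (s + l.length) 1)).filter (fun p => p.1 == t)).map (·.2)
      = (pvNatPos l t).map (fun (k : Nat) => s + (k : Int)) := by
  intro l
  induction l with
  | nil => intro s; simp [pvNatPos]
  | cons x xs ih =>
    intro s
    have hlen1 : (((x :: xs).length : Nat) : Int) = (xs.length : Int) + 1 := by
      simp only [List.length_cons]; push_cast; ring
    have hlt : s < s + ((x :: xs).length : Int) := by rw [hlen1]; omega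
    rw [PySem.List.pyRange_one_cons hlt]
    have hrange : PySem.List.pyRange (s + 1) (s + ((x :: xs).length : Int)) 1
        = PySem.List.pyRange (s + 1) ((s + 1) + (xs.length : Int)) 1 := by
      rw [hlen1]; ring_nf
    rw [hrange]
    simp only [List.zip_cons_cons, List.filter_cons]
    by_cases hx : (x == t) = true
    · simp only [hx, if_true, List.map_cons, ih (s + 1), pvNatPos]
      rw [List.map_map]
      simp only [Nat.cast_zero, add_zero]
      congr 1
      apply List.map_congr_left
      intro k _
      simp only [Function.comp_apply]
      push_cast
      ring
    · simp only [hx, Bool.false_eq_true, if_false, ih (s + 1), pvNatPos]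
      rw [List.map_map]
      apply List.map_congr_left
      intro k _
      simp only [Function.comp_apply]
      push_cast
      ring

theorem pvPositions_getD (low : List String) (t : String) :
    (pvPositions low).getD t [] = (pvNatPos low t).map (fun (k : Nat) => (k : Int)) := by
  unfold pvPositions
  rw [PySem.Dict.getD_foldl_modify_append, PySem.Dict.getD_empty]
  rw [List.nil_append]
  have h0 : PySem.List.pyRange 0 (low.length : Int) 1
      = PySem.List.pyRange 0 (0 + (low.length : Int)) 1 := by rw [zero_add]
  rw [h0, pvZipFilter t low 0]
  simp

theorem pvGo_ne_nil : ∀ (s cur : List Char) (acc : List (List Char)),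
    (∀ p ∈ acc, p ≠ []) → ∀ p ∈ PySem.Chars.split₀.go s cur acc, p ≠ [] := by
  intro s
  induction s with
  | nil =>
    intro cur acc hacc p hp
    simp only [PySem.Chars.split₀.go] at hp
    split at hp
    · exact hacc p (List.mem_reverse.mp hp)
    · rcases List.mem_cons.mp (List.mem_reverse.mp hp) with rfl | h
      · simp only [ne_eq, List.reverse_eq_nil_iff]
        intro hcur
        simp_all
      · exact hacc p h
  | cons c rest ih =>
    intro cur acc hacc p hp
    simp only [PySem.Chars.split₀.go] at hp
    split at hp
    · split at hp
      · exact ih [] acc hacc p hp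
      · refine ih [] (cur.reverse :: acc) ?_ p hp
        intro q hq
        rcases List.mem_cons.mp hq with rfl | h
        · simp only [ne_eq, List.reverse_eq_nil_iff]
          intro hcur
          simp_all
        · exact hacc q h
    · exact ih (c :: cur) acc hacc p hp

theorem split₀_tok_ne_nil (sentence : String) :
    ∀ s ∈ PySem.Str.split₀ sentence, s.toList ≠ [] := by
  intro s hs
  have h2 : s.toList ∈ List.map String.toList (PySem.Str.split₀ sentence) :=
    List.mem_map_of_mem hs
  rw [PySem.Str.split₀_map_toList] at h2
  simp only [PySem.Chars.split₀] at h2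
  exact pvGo_ne_nil _ [] [] (by simp) _ h2

theorem pvLookup_eq (toks : List String) (phrase : String) :
    pvLookup toks (pvPositions (toks.map pvNormTok)) phrase
      = (let low := toks.map pvNormTok
         let pt := PySem.Str.split₀ (PySem.Str.lower phrase)
         if pt.isEmpty then none
         else
           match pvFF low (PySem.List.pyGetD pt 0 "") with
           | none => none
           | some d => (pvFF (low.drop d) (PySem.List.pyGetD pt (-1) "")).map
               (fun e => pvSpan toks d (e + d))) := by
  unfold pvLookup
  simp only [pvPositions_getD]
  by_cases hpt : (PySem.Str.split₀ (PySem.Str.lower phrase)).isEmpty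
  · simp [hpt]
  · simp only [hpt, Bool.false_eq_true, if_false]
    cases hfp : pvNatPos (toks.map pvNormTok)
        (PySem.List.pyGetD (PySem.Str.split₀ (PySem.Str.lower phrase)) 0 "") with
    | nil =>
      have hffn : pvFF (toks.map pvNormTok)
          (PySem.List.pyGetD (PySem.Str.split₀ (PySem.Str.lower phrase)) 0 "") = none := by
        rw [← pvNatPos_head?, hfp]; rfl
      simp [hffn]
    | cons i0 r =>
      have hff : pvFF (toks.map pvNormTok)
          (PySem.List.pyGetD (PySem.Str.split₀ (PySem.Str.lower phrase)) 0 "") = some i0 := by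
        rw [← pvNatPos_head?, hfp]; rfl
      cases hlp : pvNatPos (toks.map pvNormTok)
          (PySem.List.pyGetD (PySem.Str.split₀ (PySem.Str.lower phrase)) (-1) "") with
      | nil =>
        have hnone : pvFF ((toks.map pvNormTok).drop i0)
            (PySem.List.pyGetD (PySem.Str.split₀ (PySem.Str.lower phrase)) (-1) "") = none := by
          have h3 := pvNatPos_find?
            (PySem.List.pyGetD (PySem.Str.split₀ (PySem.Str.lower phrase)) (-1) "") i0
            (toks.map pvNormTok)
          rw [hlp] at h3
          simp only [List.find?_nil] at h3
          exact Option.map_eq_none_iff.mp h3.symm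
        simp [hff, hnone]
      | cons j0 r2 =>
        simp only [hff, List.map_cons]
        show (List.find? (fun j => decide ((i0 : Int) ≤ j))
              ((j0 : Int) :: List.map (fun (k : Nat) => (k : Int)) r2)).map
            (fun j => PySem.Str.join " " (PySem.List.slice toks (some (i0 : Int)) (some (j + 1))))
          = _
        rw [← List.map_cons, ← hlp]
        rw [List.find?_map]
        have hpred : ((fun j => decide ((i0 : Int) ≤ j)) ∘ (fun k : Nat => (k : Int)))
            = fun k : Nat => decide (i0 ≤ k) := by
          funext k; simp
        rw [hpred]
        rw [pvNatPos_find?]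
        cases pvFF ((toks.map pvNormTok).drop i0)
            (PySem.List.pyGetD (PySem.Str.split₀ (PySem.Str.lower phrase)) (-1) "") with
        | none => rfl
        | some e => simp [pvSpan]

-- the append-in-both-branches foldl of A, as a map
theorem pvFoldlIfAppend {β γ : Type} (c : β → Bool) (f g : β → γ) :
    ∀ (l : List β) (acc : List γ),
      l.foldl (fun acc x => if c x then acc ++ [f x] else acc ++ [g x]) acc
        = acc ++ l.map (fun x => if c x then f x else g x) := by
  intro l
  induction l with
  | nil => intro acc; simp
  | cons x xs ih =>
    intro acc
    simp only [List.foldl_cons, List.map_cons]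
    by_cases hx : c x
    · simp [hx, ih]
    · simp [hx, ih]

-- ===== VERDICT (by name: the statement is the Claim_ definition above) =====
theorem map_phrases_by_edge_tokens_spec : Claim_equal_map_phrases_by_edge_tokens := by
  intro sentence phrases _dom
  unfold Spec_map_phrases_by_edge_tokens map_phrases_by_edge_tokens map_phrases_by_edge_tokens_alt
  rw [pvFoldlIfAppend (fun phrase => (PySem.Str.split₀ (PySem.Str.lower phrase)).isEmpty)
    (fun _ => (none : Option String))
    (fun phrase => pvOuterA (PySem.Str.split₀ sentence)
      (List.map pvNormTok (PySem.Str.split₀ sentence))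
      (PySem.List.pyGetD (PySem.Str.split₀ (PySem.Str.lower phrase)) 0 "")
      (PySem.List.pyGetD (PySem.Str.split₀ (PySem.Str.lower phrase)) (-1) "") none 0)
    phrases []]
  rw [List.nil_append]
  apply List.map_congr_left
  intro phrase _
  rw [pvLookup_eq (PySem.Str.split₀ sentence) phrase]
  simp only []
  by_cases hpt : (PySem.Str.split₀ (PySem.Str.lower phrase)).isEmpty
  · simp [hpt]
  · simp only [hpt, Bool.false_eq_true, if_false]
    have hlen : (List.map pvNormTok (PySem.Str.split₀ sentence)).length
        = (PySem.Str.split₀ sentence).length := by simp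
    have htk := split₀_tok_ne_nil sentence
    rw [pvOuterA_eq (PySem.Str.split₀ sentence)
      (List.map pvNormTok (PySem.Str.split₀ sentence)) _ _ hlen htk 0]
    simp only [List.drop_zero, Nat.zero_add]
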